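-- pv_equiv track=rewrite | github.com/victoriruela/rFactor2_engineer | frontend/views/analysis_view.py | _normalize_model_list
-- ===== SOURCE A (Python) =====
-- def _normalize_model_list(models_raw: list) -> list[str]:
--     """Return unique, non-empty model names in deterministic order."""
--     cleaned = [m.strip() for m in models_raw if isinstance(m, str) and m.strip()]
--     # De-duplicate case-insensitively while preserving first-seen spelling.
--     dedup: dict[str, str] = {}
--     for name in cleaned:
--         key = name.casefold()
--         if key not in dedup:
--             dedup[key] = name
--     # Final sort guarantees stable UI order across reruns.
--     return sorted(dedup.values(), key=str.casefold)
-- ===== SOURCE B (Python) =====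
-- def _normalize_model_list(models_raw: list) -> list[str]:
--     """Return unique, non-empty model names in deterministic order."""
--     cleaned = [m.strip() for m in models_raw if isinstance(m, str) and m.strip()]
--     # Stable sort by casefold key, then collapse adjacent equal-key runs;
--     # stability makes the first-seen spelling the first of its run.
--     out: list[str] = []
--     last = None
--     for name in sorted(cleaned, key=str.casefold):
--         key = name.casefold()
--         if key != last:
--             out.append(name)
--             last = key
--     return out
-- ===== Notes on version B (the rewrite author's own statement) =====
-- stated objective: alternative
-- what changed: Replaces the first-seen dict dedup followed by a sort with sort-first then a single adjacency scan that keeps the first element of each casefold-equal run (no dict/set; dedup emerges from sorted adjacency and sort stability).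
import Mathlib
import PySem

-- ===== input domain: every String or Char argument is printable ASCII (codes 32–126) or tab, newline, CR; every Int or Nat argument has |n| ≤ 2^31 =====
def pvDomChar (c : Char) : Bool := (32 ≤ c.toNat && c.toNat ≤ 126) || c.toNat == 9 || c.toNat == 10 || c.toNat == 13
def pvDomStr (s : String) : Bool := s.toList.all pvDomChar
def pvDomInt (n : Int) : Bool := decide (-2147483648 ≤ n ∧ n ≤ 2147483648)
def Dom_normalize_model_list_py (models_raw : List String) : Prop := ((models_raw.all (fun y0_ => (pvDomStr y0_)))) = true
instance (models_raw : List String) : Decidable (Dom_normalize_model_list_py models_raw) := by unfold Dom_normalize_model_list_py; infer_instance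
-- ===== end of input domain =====

-- B sorts the cleaned list first (stable, casefold key) and then removes duplicates in one
-- adjacency scan, instead of A's first-seen dict dedup followed by a final sort.

-- ===== PORT A =====
def normalize_model_list_py (models_raw : List String) : List String :=
  let cleaned := (models_raw.filter (fun m => PySem.Str.strip m != "")).map (fun m => PySem.Str.strip m)
  let dedup := cleaned.foldl (fun d name =>
      if d.contains (PySem.Str.lower name) then d
      else d.insert (PySem.Str.lower name) name) (PySem.Dict.empty : PySem.Dict String String)
  PySem.List.sorted (PySem.Dict.values dedup) (fun s => PySem.Str.lower s) false

-- ===== PORT B =====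
-- the loop body of B: (out, last) updated per name
def pvAdjStep (st : List String × Option String) (name : String) : List String × Option String :=
  if some (PySem.Str.lower name) ≠ st.2 then (st.1 ++ [name], some (PySem.Str.lower name)) else st

def normalize_model_list_py_alt (models_raw : List String) : List String :=
  let cleaned := (models_raw.filter (fun m => PySem.Str.strip m != "")).map (fun m => PySem.Str.strip m)
  (((PySem.List.sorted cleaned (fun s => PySem.Str.lower s) false).foldl pvAdjStep ([], none)).1)

-- ===== PRECONDITION & SPEC =====
def Spec_normalize_model_list_py (models_raw : List String) (out : List String) : Prop := out = normalize_model_list_py_alt models_raw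
instance (models_raw : List String) (out : List String) : Decidable (Spec_normalize_model_list_py models_raw out) := by unfold Spec_normalize_model_list_py; infer_instance

-- ===== CLAIM (what is proved, stated in full; the proofs are below) =====
def Claim_equal_normalize_model_list_py : Prop := ∀ (models_raw : List String), Dom_normalize_model_list_py models_raw → Spec_normalize_model_list_py models_raw (normalize_model_list_py models_raw)

-- ===== LEMMAS AND PROOFS =====

-- casefold key, abbreviated
abbrev pvK (s : String) : String := PySem.Str.lower s

-- first occurrence per key, skipping keys already seen (what A's dict loop collects as values)
def pvDk (seen : List String) : List String → List String
  | [] => []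
  | x :: xs => if pvK x ∈ seen then pvDk seen xs else x :: pvDk (pvK x :: seen) xs

-- adjacency dedup tracking the last kept key (what B's loop does)
def pvAdj (last : Option String) : List String → List String
  | [] => []
  | x :: xs => if some (pvK x) ≠ last then x :: pvAdj (some (pvK x)) xs else pvAdj last xs

-- B's fold computes pvAdj
theorem pvAdj_foldl (l : List String) : ∀ (acc : List String) (last : Option String),
    (l.foldl pvAdjStep (acc, last)).1 = acc ++ pvAdj last l := by
  induction l with
  | nil => intro acc last; simp [pvAdj]
  | cons x xs ih =>
    intro acc last
    simp only [List.foldl_cons, pvAdjStep, pvAdj]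
    by_cases h : some (PySem.Str.lower x) = last
    · rw [if_neg (not_not_intro h), if_neg (not_not_intro h)]
      exact ih acc last
    · rw [if_pos h, if_pos h]
      rw [ih (acc ++ [x]) (some (PySem.Str.lower x))]
      simp

-- pvDk depends on seen only through membership
theorem pvDk_congr (l : List String) : ∀ (s₁ s₂ : List String), (∀ k, k ∈ s₁ ↔ k ∈ s₂) →
    pvDk s₁ l = pvDk s₂ l := by
  induction l with
  | nil => intro _ _ _; rfl
  | cons x xs ih =>
    intro s₁ s₂ h
    simp only [pvDk]
    by_cases hx : pvK x ∈ s₁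
    · rw [if_pos hx, if_pos ((h _).1 hx), ih _ _ h]
    · rw [if_neg hx, if_neg (fun c => hx ((h _).2 c)), ih (pvK x :: s₁) (pvK x :: s₂)
        (by intro k; simp [h k])]

-- A's dict loop: values accumulate the first occurrence per unseen key
theorem pvDk_foldl (l : List String) : ∀ (d : PySem.Dict String String), d.keys.Nodup →
    (l.foldl (fun d name => if d.contains (PySem.Str.lower name) then d
        else d.insert (PySem.Str.lower name) name) d).values
      = d.values ++ pvDk d.keys l := by
  induction l with
  | nil => intro d _; simp [pvDk]
  | cons x xs ih =>
    intro d hnd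
    simp only [List.foldl_cons, pvDk]
    by_cases h : d.contains (PySem.Str.lower x) = true
    · rw [if_pos h, if_pos ((PySem.Dict.contains_iff_mem_keys d _).1 h), ih d hnd]
    · have h' : d.contains (PySem.Str.lower x) = false := by
        cases hc : d.contains (PySem.Str.lower x) <;> simp_all
      rw [if_neg (by simp [h']), if_neg (by
        intro hm
        exact absurd ((PySem.Dict.contains_iff_mem_keys d _).2 hm) (by simp [h']))]
      rw [ih _ (by
        rw [PySem.Dict.keys_insert_of_not_contains d x h']
        exact List.Nodup.append hnd (List.nodup_singleton _)
          (by
            intro a ha hb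
            simp only [List.mem_singleton] at hb
            subst hb
            exact absurd ((PySem.Dict.contains_iff_mem_keys d _).2 ha) (by simp [h'])))]
      rw [PySem.Dict.keys_insert_of_not_contains d x h']
      have hv : (d.insert (PySem.Str.lower x) x).values = d.values ++ [x] := by
        simp [PySem.Dict.values, PySem.Dict.items_insert_of_not_contains d x h']
      rw [hv, pvDk_congr xs (d.keys ++ [PySem.Str.lower x]) (pvK x :: d.keys)
        (by intro k; simp [pvK, or_comm])]
      simp

-- pvAdj yields elements of its input
theorem pvAdj_subset (l : List String) : ∀ (last : Option String) (y : String),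
    y ∈ pvAdj last l → y ∈ l := by
  induction l with
  | nil => intro _ _ h; simp [pvAdj] at h
  | cons x xs ih =>
    intro last y h
    simp only [pvAdj] at h
    by_cases hx : some (pvK x) = last
    · rw [if_neg (not_not_intro hx)] at h
      exact List.mem_cons_of_mem _ (ih _ _ h)
    · rw [if_pos hx] at h
      rcases List.mem_cons.1 h with h | h
      · simp [h]
      · exact List.mem_cons_of_mem _ (ih _ _ h)

-- on a key-sorted list with dominated carry, pvAdj is strictly key-increasing and avoids the carried key
theorem pvAdj_pairwise (l : List String) : ∀ (last : Option String),
    l.Pairwise (fun a b => pvK a ≤ pvK b) →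
    (∀ k, last = some k → ∀ z ∈ l, k ≤ pvK z) →
    (pvAdj last l).Pairwise (fun a b => pvK a < pvK b) ∧
      ∀ y ∈ pvAdj last l, some (pvK y) ≠ last := by
  induction l with
  | nil => intro last _ _; simp [pvAdj]
  | cons x xs ih =>
    intro last hp hdom
    rcases List.pairwise_cons.1 hp with ⟨hx, hxs⟩
    simp only [pvAdj]
    by_cases hlast : some (pvK x) = last
    · rw [if_neg (not_not_intro hlast)]
      exact ih last hxs (fun k hk z hz => hdom k hk z (List.mem_cons_of_mem _ hz))
    · rw [if_pos hlast]
      rcases ih (some (pvK x)) hxs (fun k hk z hz => by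
          injection hk with hk; subst hk; exact hx z hz) with ⟨h1, h2⟩
      refine ⟨List.pairwise_cons.2 ⟨?_, h1⟩, ?_⟩
      · intro y hy
        have hle := hx y (pvAdj_subset xs _ y hy)
        have hne := h2 y hy
        exact lt_of_le_of_ne hle (by intro he; exact hne (by rw [he]))
      · intro y hy
        rcases List.mem_cons.1 hy with hy | hy
        · subst hy; exact hlast
        · intro he
          rcases hl : last with _ | k
          · rw [hl] at he; simp at he
          · rw [hl] at he
            injection he with he
            have h1' : k ≤ pvK x := hdom k hl x List.mem_cons_self
            have h2' : pvK x ≤ pvK y := hx y (pvAdj_subset xs _ y hy)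
            rw [← he] at h1'
            exact h2 y hy (by rw [le_antisymm h2' h1'])

-- pvDk has pairwise distinct keys, none in seen
theorem pvDk_pairwise (l : List String) : ∀ (seen : List String),
    (pvDk seen l).Pairwise (fun a b => pvK a ≠ pvK b) ∧ ∀ y ∈ pvDk seen l, pvK y ∉ seen := by
  induction l with
  | nil => intro seen; simp [pvDk]
  | cons x xs ih =>
    intro seen
    simp only [pvDk]
    by_cases hx : pvK x ∈ seen
    · rw [if_pos hx]; exact ih seen
    · rw [if_neg hx]
      rcases ih (pvK x :: seen) with ⟨h1, h2⟩
      refine ⟨List.pairwise_cons.2 ⟨?_, h1⟩, ?_⟩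
      · intro y hy he
        exact h2 y hy (by rw [← he]; exact List.mem_cons_self)
      · intro y hy
        rcases List.mem_cons.1 hy with hy | hy
        · subst hy; exact hx
        · intro hs; exact h2 y hy (List.mem_cons_of_mem _ hs)

-- membership in pvDk: exactly the first occurrence of each unseen key
theorem pvDk_mem (l : List String) : ∀ (seen : List String) (y : String),
    y ∈ pvDk seen l ↔ pvK y ∉ seen ∧ l.find? (fun z => pvK z == pvK y) = some y := by
  induction l with
  | nil => intro seen y; simp [pvDk]
  | cons x xs ih =>
    intro seen y
    simp only [pvDk]
    by_cases hk : pvK x = pvK y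
    · rw [List.find?_cons_of_pos (by simp [hk])]
      by_cases hx : pvK x ∈ seen
      · rw [if_pos hx, ih]
        have hmem : pvK y ∈ seen := hk ▸ hx
        constructor
        · rintro ⟨h1, _⟩; exact absurd hmem h1
        · rintro ⟨h1, _⟩; exact absurd hmem h1
      · rw [if_neg hx]
        constructor
        · intro h
          rcases List.mem_cons.1 h with h | h
          · subst h; exact ⟨hk ▸ hx, rfl⟩
          · have h' := (ih _ y).1 h
            exact absurd (by rw [← hk]; exact List.mem_cons_self) h'.1
        · rintro ⟨_, h2⟩
          injection h2 with h2
          exact List.mem_cons.2 (Or.inl h2.symm)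
    · rw [List.find?_cons_of_neg (by simp [hk])]
      by_cases hx : pvK x ∈ seen
      · rw [if_pos hx, ih]
      · rw [if_neg hx]
        constructor
        · intro h
          rcases List.mem_cons.1 h with h | h
          · exact absurd (by rw [h]) hk
          · have h' := (ih _ y).1 h
            exact ⟨fun c => h'.1 (List.mem_cons_of_mem _ c), h'.2⟩
        · rintro ⟨h1, h2⟩
          refine List.mem_cons.2 (Or.inr ((ih _ y).2 ⟨?_, h2⟩))
          intro hc
          rcases List.mem_cons.1 hc with hc | hc
          · exact hk hc.symm
          · exact h1 hc

-- membership in pvAdj on a key-sorted list with a dominated carry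
theorem pvAdj_mem (l : List String) : ∀ (last : Option String) (y : String),
    l.Pairwise (fun a b => pvK a ≤ pvK b) →
    (∀ k, last = some k → ∀ z ∈ l, k ≤ pvK z) →
    (y ∈ pvAdj last l ↔ some (pvK y) ≠ last ∧ l.find? (fun z => pvK z == pvK y) = some y) := by
  induction l with
  | nil => intro last y _ _; simp [pvAdj]
  | cons x xs ih =>
    intro last y hp hdom
    rcases List.pairwise_cons.1 hp with ⟨hx, hxs⟩
    simp only [pvAdj]
    by_cases hlast : some (pvK x) = last
    · rw [if_neg (not_not_intro hlast)]
      rw [ih last y hxs (fun k hk z hz => hdom k hk z (List.mem_cons_of_mem _ hz))]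
      by_cases hk : pvK x = pvK y
      · have hyl : some (pvK y) = last := by rw [← hk]; exact hlast
        rw [List.find?_cons_of_pos (by simp [hk])]
        constructor
        · rintro ⟨h1, _⟩; exact absurd hyl h1
        · rintro ⟨h1, _⟩; exact absurd hyl h1
      · rw [List.find?_cons_of_neg (by simp [hk])]
    · rw [if_pos hlast]
      by_cases hk : pvK x = pvK y
      · rw [List.find?_cons_of_pos (by simp [hk])]
        constructor
        · intro h
          rcases List.mem_cons.1 h with h | h
          · subst h; exact ⟨hlast, rfl⟩
          · have h' := (ih (some (pvK x)) y hxs (fun k hkk z hz => by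
                injection hkk with hkk; subst hkk; exact hx z hz)).1 h
            exact absurd (by rw [hk]) h'.1
        · rintro ⟨_, h2⟩
          injection h2 with h2
          exact List.mem_cons.2 (Or.inl h2.symm)
      · rw [List.find?_cons_of_neg (by simp [hk])]
        rw [List.mem_cons, ih (some (pvK x)) y hxs (fun k hkk z hz => by
          injection hkk with hkk; subst hkk; exact hx z hz)]
        constructor
        · rintro (h | ⟨h1, h2⟩)
          · exact absurd (by rw [h]) hk
          · refine ⟨?_, h2⟩
            intro he
            rcases hl : last with _ | k
            · rw [hl] at he; simp at he
            · rw [hl] at he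
              injection he with he
              have hyx : y ∈ xs := List.mem_of_find?_eq_some h2
              have h1' : k ≤ pvK x := hdom k hl x List.mem_cons_self
              have h2' : pvK x ≤ pvK y := hx y hyx
              rw [← he] at h1'
              exact hk (le_antisymm h2' h1')
        · rintro ⟨h1, h2⟩
          refine Or.inr ⟨?_, h2⟩
          intro he
          injection he with he
          exact hk he.symm

-- insertBy with the sorted-comparator keeps the ≤-pairwise invariant
theorem pvIns_pairwise (x : String) (acc : List String) :
    acc.Pairwise (fun a b => pvK a ≤ pvK b) →
    (PySem.List.insertBy (fun a b => decide (pvK a < pvK b)) x acc).Pairwise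
      (fun a b => pvK a ≤ pvK b) := by
  induction acc with
  | nil => intro _; simp [PySem.List.insertBy]
  | cons y ys ih =>
    intro hp
    rcases List.pairwise_cons.1 hp with ⟨hy, hys⟩
    simp only [PySem.List.insertBy]
    by_cases h : pvK x < pvK y
    · rw [if_pos (by simpa using h)]
      refine List.pairwise_cons.2 ⟨?_, hp⟩
      intro z hz
      rcases List.mem_cons.1 hz with hz | hz
      · subst hz; exact le_of_lt h
      · exact le_trans (le_of_lt h) (hy z hz)
    · rw [if_neg (by simpa using h)]
      refine List.pairwise_cons.2 ⟨?_, ih hys⟩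
      intro z hz
      rcases (PySem.List.mem_insertBy _ _ _ _).1 hz with hz | hz
      · subst hz; exact le_of_not_gt h
      · exact hy z hz

-- filter through insertBy on a sorted accumulator: equal keys go to the back
theorem pvIns_filter (x : String) (k : String) (acc : List String) :
    acc.Pairwise (fun a b => pvK a ≤ pvK b) →
    (PySem.List.insertBy (fun a b => decide (pvK a < pvK b)) x acc).filter (fun z => pvK z == k)
      = if pvK x = k then acc.filter (fun z => pvK z == k) ++ [x]
        else acc.filter (fun z => pvK z == k) := by
  induction acc with
  | nil =>
    intro _
    simp only [PySem.List.insertBy]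
    by_cases h : pvK x = k <;> simp [h]
  | cons y ys ih =>
    intro hp
    rcases List.pairwise_cons.1 hp with ⟨hy, hys⟩
    simp only [PySem.List.insertBy]
    by_cases h : pvK x < pvK y
    · rw [if_pos (by simpa using h)]
      by_cases hxk : pvK x = k
      · have hempty : (y :: ys).filter (fun z => pvK z == k) = [] := by
          rw [List.filter_eq_nil_iff]
          intro z hz he
          have he' : pvK z = k := by simpa using he
          have hyz : pvK y ≤ pvK z := by
            rcases List.mem_cons.1 hz with hz | hz
            · subst hz; exact le_refl _
            · exact hy z hz
          have hxz : pvK x < pvK z := lt_of_lt_of_le h hyz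
          rw [he', ← hxk] at hxz
          exact lt_irrefl _ hxz
        rw [if_pos hxk, hempty]
        have hx' : (pvK x == k) = true := by simp [hxk]
        simp [hx', hempty]
      · rw [if_neg hxk]
        simp [List.filter_cons, hxk]
    · rw [if_neg (by simpa using h)]
      rw [List.filter_cons, List.filter_cons, ih hys]
      by_cases hxk : pvK x = k <;> by_cases hyk : (pvK y == k) = true <;> simp [hxk, hyk]

-- stability of the insertion-sort fold on the key-equality filter
theorem pvSort_filter_foldl (l : List String) (k : String) : ∀ (acc : List String),
    acc.Pairwise (fun a b => pvK a ≤ pvK b) →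
    (l.foldl (fun acc x => PySem.List.insertBy (fun a b => decide (pvK a < pvK b)) x acc) acc).filter
        (fun z => pvK z == k)
      = acc.filter (fun z => pvK z == k) ++ l.filter (fun z => pvK z == k) := by
  induction l with
  | nil => intro acc _; simp
  | cons x xs ih =>
    intro acc hp
    simp only [List.foldl_cons]
    rw [ih _ (pvIns_pairwise x acc hp), pvIns_filter x k acc hp, List.filter_cons]
    by_cases hxk : pvK x = k <;> simp [hxk]

-- stability: sorting does not change which element is the first of its key
theorem pvSort_find? (l : List String) (k : String) :
    (PySem.List.sorted l pvK false).find? (fun z => pvK z == k)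
      = l.find? (fun z => pvK z == k) := by
  rw [← List.head?_filter, ← List.head?_filter]
  rw [PySem.List.sorted_eq_foldl_insertBy, pvSort_filter_foldl l k [] (by simp)]
  simp

-- the core identity: sort-after-dedup equals adjacency-dedup-after-sort
theorem pvCore (xs : List String) :
    PySem.List.sorted (pvDk [] xs) pvK false = pvAdj none (PySem.List.sorted xs pvK false) := by
  have hnone : ∀ k : String, (none : Option String) = some k →
      ∀ z ∈ PySem.List.sorted xs pvK false, k ≤ pvK z := by
    intro k hk; exact absurd hk (by simp)
  apply PySem.List.sorted_eq_of_perm_of_pairwise_lt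
  · rcases pvAdj_pairwise (PySem.List.sorted xs pvK false) none
      (PySem.List.sorted_pairwise xs pvK) hnone with ⟨hpw, _⟩
    rcases pvDk_pairwise xs [] with ⟨hdk, _⟩
    rw [List.perm_ext_iff_of_nodup
      (List.Pairwise.imp (fun h => by intro he; subst he; exact lt_irrefl _ h) hpw)
      (List.Pairwise.imp (fun h => by intro he; subst he; exact h rfl) hdk)]
    intro y
    rw [pvAdj_mem _ none y (PySem.List.sorted_pairwise xs pvK) hnone,
      pvDk_mem xs [] y, pvSort_find? xs (pvK y)]
    simp
  · exact (pvAdj_pairwise (PySem.List.sorted xs pvK false) none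
      (PySem.List.sorted_pairwise xs pvK) hnone).1

-- ===== VERDICT (by name: the statement is the Claim_ definition above) =====
theorem normalize_model_list_py_spec : Claim_equal_normalize_model_list_py := by
  intro models_raw _
  show normalize_model_list_py models_raw = normalize_model_list_py_alt models_raw
  have hA : normalize_model_list_py models_raw
      = PySem.List.sorted (PySem.Dict.values
          (((models_raw.filter (fun m => PySem.Str.strip m != "")).map (fun m => PySem.Str.strip m)).foldl
            (fun d name => if d.contains (PySem.Str.lower name) then d
              else d.insert (PySem.Str.lower name) name)
            (PySem.Dict.empty : PySem.Dict String String)))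
          (fun s => PySem.Str.lower s) false := rfl
  have hB : normalize_model_list_py_alt models_raw
      = ((PySem.List.sorted ((models_raw.filter (fun m => PySem.Str.strip m != "")).map
            (fun m => PySem.Str.strip m)) (fun s => PySem.Str.lower s) false).foldl
          pvAdjStep ([], none)).1 := rfl
  rw [hA, hB, pvAdj_foldl _ [] none]
  rw [pvDk_foldl _ PySem.Dict.empty (by simp [PySem.Dict.keys_empty])]
  have hkeys : (PySem.Dict.empty : PySem.Dict String String).keys = [] := PySem.Dict.keys_empty
  have hvals : (PySem.Dict.empty : PySem.Dict String String).values = [] := by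
    simp [PySem.Dict.values, PySem.Dict.empty]
  rw [hkeys, hvals]
  simpa [pvK] using pvCore ((models_raw.filter (fun m => PySem.Str.strip m != "")).map (fun m => PySem.Str.strip m))
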